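-- pv_equiv track=rewrite | github.com/alexfok/ves_test | ncaieee_ext.py | create_ranges
-- ===== SOURCE A (Python) =====
-- def create_ranges(X, n):
--     ranges = []
--
--     # Start with the first range
--     start = 0
--     end = start + n - 1  # The first range can have a size of at most n or X, whichever is smaller
--
--     while start < X:
--         ranges.append((start, end))
--
--         # Move to the next range
--         start = end + 1
--         end = start + n - 1
--
--     return ranges
-- ===== SOURCE B (Python) =====
-- def _build(c, n):
--     """Ranges (0, n-1), (n, 2n-1), ... for c consecutive blocks, built by
--     divide and conquer: split the count, build each half at origin 0,
--     shift the right half into place."""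
--     if c == 0:
--         return []
--     if c == 1:
--         return [(0, n - 1)]
--     h = c // 2
--     left = _build(h, n)
--     right = _build(c - h, n)
--     off = h * n
--     return left + [(a + off, b + off) for (a, b) in right]
--
--
-- def create_ranges(X, n):
--     count = 0 if X <= 0 else (X - 1) // n + 1
--     return _build(count, n)
-- ===== Notes on version B (the rewrite author's own statement) =====
-- stated objective: alternative
-- what changed: Replaces A's accumulator while-loop (mutable start/end advanced range by range) with a closed-form range count followed by a divide-and-conquer construction that recursively builds each half of the list at origin 0 and shifts the right half by h*n.
import Mathlib
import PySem

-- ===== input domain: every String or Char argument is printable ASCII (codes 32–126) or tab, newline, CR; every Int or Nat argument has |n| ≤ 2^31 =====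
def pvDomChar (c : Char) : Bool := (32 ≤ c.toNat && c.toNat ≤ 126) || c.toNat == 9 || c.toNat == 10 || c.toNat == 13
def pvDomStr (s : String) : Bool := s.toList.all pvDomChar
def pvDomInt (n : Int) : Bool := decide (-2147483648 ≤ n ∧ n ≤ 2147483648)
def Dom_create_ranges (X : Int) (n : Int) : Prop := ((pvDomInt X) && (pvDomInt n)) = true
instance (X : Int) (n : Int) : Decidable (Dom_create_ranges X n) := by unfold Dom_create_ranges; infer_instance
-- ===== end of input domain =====

-- B replaces A's mutable start/end while-loop by a closed-form range count plus a divide-and-conquer build (objective: alternative).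


-- ===== PORT A =====
-- A's while-loop; the Nat fuel is only a totality device (inside Pre_ the loop
-- makes at most X.toNat iterations, so the fuel never runs out).
def createRangesLoopA (X n : Int) : Nat → Int → List (Int × Int) → List (Int × Int)
  | 0, _, acc => acc
  | fuel + 1, start, acc =>
    if start < X then
      createRangesLoopA X n fuel (start + n) (acc ++ [(start, start + n - 1)])
    else acc

def create_ranges (X : Int) (n : Int) : List (Int × Int) :=
  createRangesLoopA X n (X.toNat + 1) 0 []

-- ===== PORT B =====
-- Source B's _build: divide and conquer on the count (a Nat here: inside Pre_ the
-- Python count is a nonnegative int, so recursion over Nat is exact).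
def buildB : Nat → Int → List (Int × Int)
  | 0, _ => []
  | 1, n => [(0, n - 1)]
  | c + 2, n =>
    let h := (c + 2) / 2
    let off : Int := (h : Int) * n
    buildB h n ++ (buildB (c + 2 - h) n).map (fun p => (p.1 + off, p.2 + off))
  termination_by c _ => c
  decreasing_by all_goals omega

def create_ranges_alt (X : Int) (n : Int) : List (Int × Int) :=
  let count : Int := if X ≤ 0 then 0 else PySem.Int.floordiv (X - 1) n + 1
  buildB count.toNat n

-- ===== PRECONDITION & SPEC =====
-- Pre_ excludes n ≤ 0 with X > 0: there A's while-loop never terminates (start never grows past X).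
def Pre_create_ranges (X : Int) (n : Int) : Prop := 1 ≤ n ∨ X ≤ 0
instance (X : Int) (n : Int) : Decidable (Pre_create_ranges X n) := by unfold Pre_create_ranges; infer_instance
def pvWitness_create_ranges : Int × Int := (10, 3)
def Spec_create_ranges (X : Int) (n : Int) (out : List (Int × Int)) : Prop := out = create_ranges_alt X n
instance (X : Int) (n : Int) (out : List (Int × Int)) : Decidable (Spec_create_ranges X n out) := by unfold Spec_create_ranges; infer_instance

-- ===== CLAIM (what is proved, stated in full; the proofs are below) =====
def Claim_equal_create_ranges : Prop := ∀ (X : Int) (n : Int), Dom_create_ranges X n → Pre_create_ranges X n → Spec_create_ranges X n (create_ranges X n)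

-- ===== LEMMAS AND PROOFS =====

-- closed description of buildB's result: the k-th block, k = 0 .. c-1
def rmap (c : Nat) (n : Int) : List (Int × Int) :=
  (List.range c).map (fun (k : Nat) => ((k : Int) * n, (k : Int) * n + n - 1))

theorem rmap_add (a b : Nat) (n : Int) :
    rmap (a + b) n = rmap a n ++ (rmap b n).map (fun p => (p.1 + (a : Int) * n, p.2 + (a : Int) * n)) := by
  simp only [rmap, List.range_add, List.map_append, List.map_map]
  congr 1
  apply List.map_congr_left
  intro k _
  simp only [Function.comp, Prod.ext_iff]
  push_cast
  constructor <;> ring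

theorem buildB_eq (c : Nat) (n : Int) : buildB c n = rmap c n := by
  induction c using Nat.strong_induction_on with
  | _ c ih =>
    match c with
    | 0 => simp [buildB, rmap]
    | 1 => simp [buildB, rmap]
    | c + 2 =>
      rw [buildB, ih ((c + 2) / 2) (by omega), ih ((c + 2) - (c + 2) / 2) (by omega),
        ← rmap_add, show (c + 2) / 2 + ((c + 2) - (c + 2) / 2) = c + 2 by omega]

theorem rmap_succ (c : Nat) (n : Int) :
    rmap (c + 1) n = (0, n - 1) :: (rmap c n).map (fun p => (p.1 + n, p.2 + n)) := by
  simp only [rmap, List.range_succ_eq_map, List.map_cons, List.map_map]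
  congr 1
  · norm_num
  apply List.map_congr_left
  intro k _
  simp only [Function.comp, Prod.ext_iff]
  push_cast
  constructor <;> ring

theorem alt_nonpos (Y n : Int) (hY : Y ≤ 0) : create_ranges_alt Y n = [] := by
  simp [create_ranges_alt, hY, buildB]

theorem alt_step (Y n : Int) (hn : 1 ≤ n) (hY : 0 < Y) :
    create_ranges_alt Y n
      = (0, n - 1) :: (create_ranges_alt (Y - n) n).map (fun p => (p.1 + n, p.2 + n)) := by
  by_cases h : Y - n ≤ 0
  · have hq : PySem.Int.floordiv (Y - 1) n = 0 := by
      rw [PySem.Int.floordiv_eq_iff_of_pos (by omega)]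
      constructor <;> nlinarith
    rw [alt_nonpos (Y - n) n h]
    simp only [create_ranges_alt, hq, show ¬ Y ≤ 0 by omega, if_false]
    rw [buildB_eq]
    norm_num [rmap, List.range_succ]
  · push Not at h
    set q := PySem.Int.floordiv (Y - n - 1) n with hqdef
    have hq : q * n ≤ Y - n - 1 ∧ Y - n - 1 < (q + 1) * n := by
      rw [← PySem.Int.floordiv_eq_iff_of_pos (by omega)]
    have hq' : PySem.Int.floordiv (Y - 1) n = q + 1 := by
      rw [PySem.Int.floordiv_eq_iff_of_pos (by omega)]
      constructor <;> nlinarith [hq.1, hq.2]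
    have hq0 : 0 ≤ q := by nlinarith [hq.2]
    simp only [create_ranges_alt, hq', show ¬ Y ≤ 0 by omega, show ¬ Y - n ≤ 0 by omega,
      if_false]
    rw [buildB_eq, buildB_eq, ← hqdef,
      show (q + 1 + 1).toNat = (q + 1).toNat + 1 by omega, rmap_succ]

theorem loop_eq (n : Int) (hn : 1 ≤ n) :
    ∀ (fuel : Nat) (X start : Int) (acc : List (Int × Int)), (X - start).toNat ≤ fuel →
      createRangesLoopA X n fuel start acc
        = acc ++ (create_ranges_alt (X - start) n).map (fun p => (p.1 + start, p.2 + start)) := by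
  intro fuel
  induction fuel with
  | zero =>
    intro X start acc h
    rw [alt_nonpos _ n (by omega)]
    simp [createRangesLoopA]
  | succ f ih =>
    intro X start acc h
    by_cases hs : start < X
    · have hrec := ih X (start + n) (acc ++ [(start, start + n - 1)]) (by omega)
      rw [createRangesLoopA, if_pos hs, hrec,
        alt_step (X - start) n hn (by omega),
        show X - (start + n) = X - start - n by ring]
      simp only [List.map_cons, List.map_map, List.append_assoc, List.cons_append,
        List.nil_append]
      congr 1
      congr 1
      · simp [Prod.ext_iff]; ring
      · apply List.map_congr_left
        intro p _
        simp only [Function.comp, Prod.ext_iff]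
        constructor <;> ring
    · rw [createRangesLoopA, if_neg hs, alt_nonpos _ n (by omega)]
      simp

-- ===== VERDICT (by name: the statement is the Claim_ definition above) =====
theorem create_ranges_spec : Claim_equal_create_ranges := by
  intro X n _ hpre
  unfold Spec_create_ranges create_ranges
  rcases hpre with hn | hX
  · rw [loop_eq n hn (X.toNat + 1) X 0 [] (by omega)]
    simp
  · rw [alt_nonpos X n hX]
    have : ¬ (0 : Int) < X := by omega
    simp [createRangesLoopA, this]
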